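-- pv_equiv track=rewrite | github.com/patrick-l-braun/MA334 | questions.py | find_valid_disjoint
-- ===== SOURCE A (Python) =====
-- from itertools import combinations
--
-- def find_valid_disjoint(V, fam_sets, i):
--     # iterate over all combinations of sets in fam_sets
--     # attempt to find pairwise disjoint set
--
--     sets = list(combinations(fam_sets, i))
--     for potential_max in sets:
--         if sum([len(a) for a in potential_max]) > len(V):
--             continue
--         if pairwise_disjoint(potential_max):
--             return True
--     return False
--
-- def pairwise_disjoint(set_of_sets):
--     # check's if set of sets are pairwise disjoint
--     a = set()
--     for s in set_of_sets:
--         for val in s: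
--             if val in a:
--                 return False
--             a.add(val)
--     return True
-- ===== SOURCE B (Python) =====
-- def find_valid_disjoint(V, fam_sets, i):
--     # recursive backtracking: walk fam_sets in order, tracking sets still
--     # needed, the accumulated union and its size; prune when union grows
--     # past len(V) or a duplicate element appears.
--     return _search(len(V), fam_sets, i, set(), 0)
--
-- def _search(cap, remaining, needed, union, size):
--     if needed == 0:
--         return True
--     if not remaining:
--         return False
--     s, rest = remaining[0], remaining[1:]
--     ext = _extend(union, s)
--     if ext is not None and size + len(s) <= cap:
--         if _search(cap, rest, needed - 1, ext, size + len(s)):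
--             return True
--     return _search(cap, rest, needed, union, size)
--
-- def _extend(union, s):
--     new = set(union)
--     for v in s:
--         if v in new:
--             return None
--         new.add(v)
--     return new
-- ===== Notes on version B (the rewrite author's own statement) =====
-- stated objective: alternative
-- what changed: Replaces materializing all itertools combinations and filtering them with a recursive backtracking search over fam_sets that carries the remaining count, the accumulated union and its size, abandoning a branch as soon as a duplicate element or a size overflow appears.
import Mathlib
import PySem

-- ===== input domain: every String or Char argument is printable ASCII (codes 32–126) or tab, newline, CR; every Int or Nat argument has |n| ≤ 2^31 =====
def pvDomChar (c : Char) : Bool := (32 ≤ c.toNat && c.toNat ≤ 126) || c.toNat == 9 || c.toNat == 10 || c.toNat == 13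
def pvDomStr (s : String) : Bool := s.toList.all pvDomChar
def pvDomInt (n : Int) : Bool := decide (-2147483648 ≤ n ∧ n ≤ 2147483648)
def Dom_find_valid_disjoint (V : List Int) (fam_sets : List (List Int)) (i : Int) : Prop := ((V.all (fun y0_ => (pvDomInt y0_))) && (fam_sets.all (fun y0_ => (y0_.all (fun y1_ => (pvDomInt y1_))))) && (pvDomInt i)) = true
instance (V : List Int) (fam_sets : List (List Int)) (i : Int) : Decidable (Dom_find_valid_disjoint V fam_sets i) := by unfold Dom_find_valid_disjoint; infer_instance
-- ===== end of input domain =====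

-- B replaces the materialize-all-combinations-and-filter loop by a recursive
-- backtracking search with pruning (alternative decomposition, same worst case).

-- ===== PORT A =====
-- itertools.combinations(xs, k), Python's order (indices increasing, lexicographic)
def pyCombinations {α : Type} : List α → Nat → List (List α)
  | _, 0 => [[]]
  | [], _ + 1 => []
  | x :: xs, k + 1 => (pyCombinations xs k).map (x :: ·) ++ pyCombinations xs (k + 1)

-- inner 'for val in s' loop of pairwise_disjoint: none = early return False
def pdInner (a : PySem.Set Int) : List Int → Option (PySem.Set Int)
  | [] => some a
  | v :: vs => if PySem.Set.contains a v then none else pdInner (PySem.Set.add a v) vs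

-- outer 'for s in set_of_sets' loop
def pdOuter (a : PySem.Set Int) : List (List Int) → Bool
  | [] => true
  | s :: rest =>
    match pdInner a s with
    | none => false
    | some a' => pdOuter a' rest

def pairwise_disjoint (set_of_sets : List (List Int)) : Bool :=
  pdOuter PySem.Set.empty set_of_sets

-- 'for potential_max in sets' loop of A
def fvdLoop (V : List Int) : List (List (List Int)) → Bool
  | [] => false
  | c :: rest =>
    if (c.map (fun a => a.length)).sum > V.length then fvdLoop V rest
    else if pairwise_disjoint c then true
    else fvdLoop V rest

def find_valid_disjoint (V : List Int) (fam_sets : List (List Int)) (i : Int) : Bool :=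
  fvdLoop V (pyCombinations fam_sets i.toNat)

-- ===== PORT B =====
-- _search (Source B's _extend is the same add-elements-fail-on-repeat loop as pdInner; shared)
-- _search: backtracking over the remaining family
def bSearch (cap : Nat) (remaining : List (List Int)) (needed : Int)
    (union : PySem.Set Int) (size : Nat) : Bool :=
  if needed = 0 then true
  else
    match remaining with
    | [] => false
    | s :: rest =>
      match pdInner union s with
      | some ext =>
        if size + s.length ≤ cap then
          if bSearch cap rest (needed - 1) ext (size + s.length) then true
          else bSearch cap rest needed union size
        else bSearch cap rest needed union size
      | none => bSearch cap rest needed union size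

def find_valid_disjoint_alt (V : List Int) (fam_sets : List (List Int)) (i : Int) : Bool :=
  bSearch V.length fam_sets i PySem.Set.empty 0

-- ===== PRECONDITION & SPEC =====
-- Pre_ excludes i < 0, on which Python A raises ValueError (itertools.combinations).
def Pre_find_valid_disjoint (V : List Int) (fam_sets : List (List Int)) (i : Int) : Prop := 0 ≤ i
instance (V : List Int) (fam_sets : List (List Int)) (i : Int) : Decidable (Pre_find_valid_disjoint V fam_sets i) := by unfold Pre_find_valid_disjoint; infer_instance

def pvWitness_find_valid_disjoint : List Int × List (List Int) × Int := ([1, 2], [[1], [2]], 2)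

def Spec_find_valid_disjoint (V : List Int) (fam_sets : List (List Int)) (i : Int) (out : Bool) : Prop := out = find_valid_disjoint_alt V fam_sets i
instance (V : List Int) (fam_sets : List (List Int)) (i : Int) (out : Bool) : Decidable (Spec_find_valid_disjoint V fam_sets i out) := by unfold Spec_find_valid_disjoint; infer_instance

-- ===== CLAIM (what is proved, stated in full; the proofs are below) =====
def Claim_equal_find_valid_disjoint : Prop := ∀ (V : List Int) (fam_sets : List (List Int)) (i : Int), Dom_find_valid_disjoint V fam_sets i → Pre_find_valid_disjoint V fam_sets i → Spec_find_valid_disjoint V fam_sets i (find_valid_disjoint V fam_sets i)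


-- ===== LEMMAS AND PROOFS =====

-- A's loop is an 'any' over the combination list
lemma fvdLoop_eq_any (V : List Int) (L : List (List (List Int))) :
    fvdLoop V L = L.any (fun c =>
      decide ((c.map (fun a => a.length)).sum ≤ V.length) && pairwise_disjoint c) := by
  induction L with
  | nil => rfl
  | cons c rest ih =>
    simp only [fvdLoop, List.any_cons, ih]
    by_cases h : (c.map (fun a => a.length)).sum > V.length
    · simp [h, Nat.not_le.mpr h]
    · have h' : (c.map (fun a => a.length)).sum ≤ V.length := Nat.not_lt.mp h
      simp only [if_neg h, h', decide_true, Bool.true_and]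
      by_cases hp : pairwise_disjoint c = true <;> simp [hp]

-- unfold lemmas for bSearch
lemma bSearch_zero (cap : Nat) (rem : List (List Int)) (u : PySem.Set Int) (sz : Nat) :
    bSearch cap rem 0 u sz = true := by
  rw [bSearch.eq_def]; simp

lemma bSearch_nil (cap : Nat) (k : Int) (u : PySem.Set Int) (sz : Nat) (hk : k ≠ 0) :
    bSearch cap [] k u sz = false := by
  rw [bSearch.eq_def, if_neg hk]

lemma bSearch_cons_none (cap : Nat) (s : List Int) (rest : List (List Int)) (k : Int)
    (u : PySem.Set Int) (sz : Nat) (hk : k ≠ 0) (hext : pdInner u s = none) :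
    bSearch cap (s :: rest) k u sz = bSearch cap rest k u sz := by
  rw [bSearch.eq_def, if_neg hk]; simp only [hext]

lemma bSearch_cons_some (cap : Nat) (s : List Int) (rest : List (List Int)) (k : Int)
    (u u' : PySem.Set Int) (sz : Nat) (hk : k ≠ 0) (hext : pdInner u s = some u') :
    bSearch cap (s :: rest) k u sz =
      (if sz + s.length ≤ cap then
        (if bSearch cap rest (k - 1) u' (sz + s.length) then true else bSearch cap rest k u sz)
       else bSearch cap rest k u sz) := by
  rw [bSearch.eq_def, if_neg hk]; simp only [hext]

lemma list_any_congr {α : Type} (l : List α) (f g : α → Bool) (h : ∀ x, f x = g x) :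
    l.any f = l.any g := by
  rw [funext h]

-- the backtracking search equals 'any' over combinations, given the running size fits
lemma bSearch_eq_any (cap : Nat) (rem : List (List Int)) (n : Nat)
    (u : PySem.Set Int) (sz : Nat) (h : sz ≤ cap) :
    bSearch cap rem (n : Int) u sz = (pyCombinations rem n).any (fun c =>
      decide (sz + (c.map (fun a => a.length)).sum ≤ cap) && pdOuter u c) := by
  induction rem generalizing n u sz with
  | nil =>
    cases n with
    | zero => simp [bSearch_zero, pyCombinations, pdOuter, h]
    | succ m =>
      rw [bSearch_nil cap _ u sz (by push_cast; omega)]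
      simp [pyCombinations]
  | cons s rest ih =>
    cases n with
    | zero => simp [bSearch_zero, pyCombinations, pdOuter, h]
    | succ m =>
      have hne : (((m + 1 : Nat)) : Int) ≠ 0 := by push_cast; omega
      cases hext : pdInner u s with
      | none =>
        have hsplit : (pyCombinations (s :: rest) (m + 1)).any (fun c =>
              decide (sz + (c.map (fun a => a.length)).sum ≤ cap) && pdOuter u c)
            = (((pyCombinations rest m).any (fun _ => false)) ||
               ((pyCombinations rest (m + 1)).any (fun c =>
                  decide (sz + (c.map (fun a => a.length)).sum ≤ cap) && pdOuter u c))) := by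
          simp only [pyCombinations, List.any_append, List.any_map]
          congr 1
          apply list_any_congr
          intro c
          simp [Function.comp_apply, pdOuter, hext]
        rw [hsplit, bSearch_cons_none cap s rest _ u sz hne hext, ih (m + 1) u sz h]
        simp
      | some u' =>
        have hsplit : (pyCombinations (s :: rest) (m + 1)).any (fun c =>
              decide (sz + (c.map (fun a => a.length)).sum ≤ cap) && pdOuter u c)
            = (((pyCombinations rest m).any (fun c =>
                  decide (sz + s.length + (c.map (fun a => a.length)).sum ≤ cap) && pdOuter u' c)) ||
               ((pyCombinations rest (m + 1)).any (fun c =>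
                  decide (sz + (c.map (fun a => a.length)).sum ≤ cap) && pdOuter u c))) := by
          simp only [pyCombinations, List.any_append, List.any_map]
          congr 1
          apply list_any_congr
          intro c
          simp [Function.comp_apply, pdOuter, hext, ← Nat.add_assoc]
        rw [hsplit, bSearch_cons_some cap s rest _ u u' sz hne hext]
        by_cases hsz : sz + s.length ≤ cap
        · rw [if_pos hsz,
            show (((m + 1 : Nat)) : Int) - 1 = ((m : Nat) : Int) by push_cast; ring,
            ih m u' (sz + s.length) hsz, ih (m + 1) u sz h]
          cases htake : (pyCombinations rest m).any (fun c =>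
              decide (sz + s.length + ((c.map (fun a => a.length)).sum) ≤ cap) && pdOuter u' c) <;>
            simp
        · rw [if_neg hsz, ih (m + 1) u sz h,
            list_any_congr (pyCombinations rest m) _ (fun _ => false) (by
              intro c
              have hh : ¬ (sz + s.length + ((c.map (fun a => a.length)).sum) ≤ cap) := by omega
              simp [hh])]
          simp

-- ===== VERDICT (by name: the statement is the Claim_ definition above) =====
theorem find_valid_disjoint_spec : Claim_equal_find_valid_disjoint := by
  intro V fam i _ hpre
  unfold Spec_find_valid_disjoint find_valid_disjoint find_valid_disjoint_alt
  have hi : ((i.toNat : Nat) : Int) = i := Int.toNat_of_nonneg hpre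
  have hB := bSearch_eq_any V.length fam i.toNat PySem.Set.empty 0 (Nat.zero_le _)
  rw [hi] at hB
  rw [fvdLoop_eq_any, hB]
  apply list_any_congr
  intro c
  simp [pairwise_disjoint, PySem.Set.empty]
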